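-- pv_equiv track=rewrite | github.com/unssfit/python-programming-work- | ZeroTerminatedSum.py | terminatedSum
-- ===== SOURCE A (Python) =====
-- def terminatedSum(string):
--     sub,sNum,digitSum = ([],[],[])
--     for i in range(len(string)):
--         if string[i] is not '0':
--             sNum.append(string[i])
--         else:
--             sub.append(sNum)
--             sNum = []
--     for j in range(len(sub)):
--         sm = 0
--         for x in range(len(sub[j])):
--             if sub[j][x] is not '[]':
--                 sm += int(sub[j][x])
--         digitSum.append(sm)
--     index = 0
--     for s in range(len(digitSum)-1):
--         if digitSum[0] < digitSum[s+1]: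
--             index = s+1
--             temp = digitSum[0]
--             digitSum[0] = digitSum[s+1]
--             digitSum[s+1] = temp
--     return 'Largest sum of degit is:',''.join(sub[index]),'and its Sum is:',digitSum[0]
-- ===== SOURCE B (Python) =====
-- def terminatedSum(string):
--     # One streaming pass: keep only the current buffer and the best (segment, digit-sum) so far.
--     best = None
--     cur = []
--     for ch in string:
--         if ch == '0':
--             s = sum(int(c) for c in cur)
--             if best is None or s > best[1]:
--                 best = (''.join(cur), s)
--             cur = []
--         else:
--             cur.append(ch)
--     return 'Largest sum of degit is:', best[0], 'and its Sum is:', best[1]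
-- ===== Notes on version B (the rewrite author's own statement) =====
-- stated objective: simpler
-- what changed: B replaces A's three passes (build all segments, build all digit sums, then a swap-based max-selection loop over the sums list) with a single streaming pass that keeps only the current buffer and the running best (segment, sum), updating on strict improvement so ties keep the first segment.
import Mathlib
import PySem

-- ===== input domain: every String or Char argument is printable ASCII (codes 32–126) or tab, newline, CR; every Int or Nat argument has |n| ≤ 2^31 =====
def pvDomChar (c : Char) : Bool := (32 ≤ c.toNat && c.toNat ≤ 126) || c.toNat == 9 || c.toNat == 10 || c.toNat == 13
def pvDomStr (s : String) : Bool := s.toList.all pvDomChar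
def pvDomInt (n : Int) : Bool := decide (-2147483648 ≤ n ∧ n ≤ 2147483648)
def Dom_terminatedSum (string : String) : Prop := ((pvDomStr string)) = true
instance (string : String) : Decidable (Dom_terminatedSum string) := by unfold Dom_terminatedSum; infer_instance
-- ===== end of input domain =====

-- B replaces A's three passes (collect segments, list of digit sums, swap-based max loop) by one
-- streaming pass keeping only the running best (segment, sum); same return value wherever A returns.


-- ===== PORT A =====
-- int(c): exact for the digit characters admitted by Pre_ (Python raises ValueError on others).
def pvDigit (c : Char) : Int := (c.toNat : Int) - 48

-- first loop: if string[i] is not '0': sNum.append(...) else: sub.append(sNum); sNum = []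
def pvStepSplitA (st : List (List Char) × List Char) (c : Char) : List (List Char) × List Char :=
  if c ≠ '0' then (st.1, st.2 ++ [c]) else (st.1 ++ [st.2], [])

-- inner loop of the second pass (the `is not '[]'` guard is always true for a 1-char string)
def pvSegSum (seg : List Char) : Int := seg.foldl (fun sm c => sm + pvDigit c) 0

-- third loop body: compare digitSum[0] with digitSum[s+1], record index and swap
def pvStepSel (st : Int × List Int) (s : Int) : Int × List Int :=
  if PySem.List.pyGetD st.2 0 0 < PySem.List.pyGetD st.2 (s + 1) 0 then
    (s + 1,
      PySem.List.pySetD (PySem.List.pySetD st.2 0 (PySem.List.pyGetD st.2 (s + 1) 0)) (s + 1)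
        (PySem.List.pyGetD st.2 0 0))
  else st

def terminatedSum (string : String) : String × String × String × Int :=
  let p := string.toList.foldl pvStepSplitA ([], [])
  let sub := p.1
  let digitSum := sub.foldl (fun ds seg => ds ++ [pvSegSum seg]) []
  let r := (PySem.List.pyRange 0 ((digitSum.length : Int) - 1) 1).foldl pvStepSel (0, digitSum)
  ("Largest sum of degit is:", String.ofList (PySem.List.pyGetD sub r.1 []),
   "and its Sum is:", PySem.List.pyGetD r.2 0 0)

-- ===== PORT B =====
-- state: (best : None | (best_seg, best_sum), cur)
def pvStepB (st : Option (String × Int) × List Char) (c : Char) :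
    Option (String × Int) × List Char :=
  if c = '0' then
    let s := (st.2.map pvDigit).sum
    match st.1 with
    | none => (some (String.ofList st.2, s), [])
    | some p => if s > p.2 then (some (String.ofList st.2, s), []) else (some p, [])
  else (st.1, st.2 ++ [c])

def terminatedSum_alt (string : String) : String × String × String × Int :=
  let st := string.toList.foldl pvStepB (none, [])
  -- best[0] / best[1]: Python raises TypeError when best is None ('0' ∉ string, outside Pre_);
  -- the default below is never reached on Pre_.
  let b := st.1.getD ("", 0)
  ("Largest sum of degit is:", b.1, "and its Sum is:", b.2)

-- ===== PRECONDITION & SPEC =====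
-- Pre_: the exact domain on which Python's A returns: the string contains a '0' (else sub[index]
-- raises IndexError) and every character up to the last '0' is a digit (else int() raises ValueError).
def Pre_terminatedSum (string : String) : Prop :=
  '0' ∈ string.toList ∧
  (string.toList.reverse.dropWhile (fun c => c != '0')).all Char.isDigit = true

instance (string : String) : Decidable (Pre_terminatedSum string) := by
  unfold Pre_terminatedSum; infer_instance

def pvWitness_terminatedSum : String := "950"

def Spec_terminatedSum (string : String) (out : String × String × String × Int) : Prop :=
  out = terminatedSum_alt string

instance (string : String) (out : String × String × String × Int) :
    Decidable (Spec_terminatedSum string out) := by unfold Spec_terminatedSum; infer_instance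

-- ===== CLAIM (what is proved, stated in full; the proofs are below) =====
def Claim_equal_terminatedSum : Prop :=
  ∀ (string : String), Dom_terminatedSum string → Pre_terminatedSum string →
    Spec_terminatedSum string (terminatedSum string)

-- ===== LEMMAS AND PROOFS =====

-- the list of '0'-terminated segments of cs, with cur as the open buffer; .2 is the trailing buffer
def pvSplit : List Char → List Char → List (List Char) × List Char
  | [], cur => ([], cur)
  | c :: cs, cur =>
      if c = '0' then (cur :: (pvSplit cs []).1, (pvSplit cs []).2)
      else pvSplit cs (cur ++ [c])

def pvSum (seg : List Char) : Int := (seg.map pvDigit).sum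

-- first-strict-max selection: counter k, state (best index, best value)
def pvPick : List Int → Nat → Nat × Int → Nat × Int
  | [], _, st => st
  | v :: vs, k, st => pvPick vs (k + 1) (if st.2 < v then (k, v) else st)

def pvBest (o : Option (String × Int)) (seg : List Char) : Option (String × Int) :=
  match o with
  | none => some (String.ofList seg, pvSum seg)
  | some p => if pvSum seg > p.2 then some (String.ofList seg, pvSum seg) else some p

theorem pv_A1 (cs : List Char) : ∀ (sub : List (List Char)) (cur : List Char),
    cs.foldl pvStepSplitA (sub, cur) = (sub ++ (pvSplit cs cur).1, (pvSplit cs cur).2) := by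
  induction cs with
  | nil => intro sub cur; simp [pvSplit]
  | cons c cs ih =>
      intro sub cur
      by_cases h : c = '0' <;> simp [pvStepSplitA, pvSplit, h, ih]

theorem pv_B1 (cs : List Char) : ∀ (o : Option (String × Int)) (cur : List Char),
    cs.foldl pvStepB (o, cur) =
      ((pvSplit cs cur).1.foldl pvBest o, (pvSplit cs cur).2) := by
  induction cs with
  | nil => intro o cur; simp [pvSplit]
  | cons c cs ih =>
      intro o cur
      by_cases h : c = '0'
      · simp only [List.foldl_cons, pvStepB, h, if_true, pvSplit]
        cases o with
        | none => simp [ih, pvBest, pvSum]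
        | some p =>
            by_cases hgt : (cur.map pvDigit).sum > p.2 <;>
              simp [hgt, ih, pvBest, pvSum, gt_iff_lt]
      · simp [pvStepB, pvSplit, h, ih]

theorem pv_sum_eq (seg : List Char) : pvSegSum seg = pvSum seg := by
  simpa [pvSegSum, pvSum] using PySem.List.foldl_add seg pvDigit 0

theorem pv_pick_append (l : List Int) (x : Int) : ∀ (k : Nat) (st : Nat × Int),
    pvPick (l ++ [x]) k st =
      if (pvPick l k st).2 < x then (k + l.length, x) else pvPick l k st := by
  induction l with
  | nil => intro k st; simp [pvPick]
  | cons v vs ih =>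
      intro k st
      simp only [List.cons_append, pvPick, ih, List.length_cons]
      rw [show k + 1 + vs.length = k + (vs.length + 1) from by omega]

theorem pv_pySetD_zero (xs : List Int) (v : Int) : PySem.List.pySetD xs 0 v = xs.set 0 v := by
  simpa using PySem.List.pySetD_natCast (xs := xs) (n := 0) (v := v)

theorem pv_SEL (vs : List Int) (v : Int) (m : Nat) (hm : m ≤ vs.length) :
    (((List.range m).foldl (fun st (k : Nat) => pvStepSel st ((0 : Int) + k)) ((0 : Int), v :: vs)).1
        = ((pvPick (vs.take m) 1 (0, v)).1 : Int)) ∧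
    (((List.range m).foldl (fun st (k : Nat) => pvStepSel st ((0 : Int) + k)) ((0 : Int), v :: vs)).2.getD 0 0
        = (pvPick (vs.take m) 1 (0, v)).2) ∧
    (((List.range m).foldl (fun st (k : Nat) => pvStepSel st ((0 : Int) + k)) ((0 : Int), v :: vs)).2.length
        = vs.length + 1) ∧
    ∀ j, m + 1 ≤ j →
      (((List.range m).foldl (fun st (k : Nat) => pvStepSel st ((0 : Int) + k)) ((0 : Int), v :: vs)).2.getD j 0
        = (v :: vs).getD j 0) := by
  induction m with
  | zero => simp [pvPick]
  | succ m ih =>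
      have hm' : m ≤ vs.length := by omega
      have hml : m < vs.length := by omega
      obtain ⟨ih1, ih2, ih3, ih4⟩ := ih hm'
      rw [List.range_succ]
      simp only [List.foldl_append, List.foldl_cons, List.foldl_nil]
      set r := (List.range m).foldl (fun st (k : Nat) => pvStepSel st ((0 : Int) + k))
        ((0 : Int), v :: vs) with hr
      rw [zero_add]
      simp only [pvStepSel]
      rw [show ((m : Int) + 1) = (((m + 1 : Nat)) : Int) from by push_cast; ring]
      simp only [PySem.List.pyGetD_natCast, PySem.List.pyGetD_zero, PySem.List.pySetD_natCast,
        pv_pySetD_zero]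
      rw [ih2, ih4 (m + 1) (by omega)]
      have hvm : (v :: vs).getD (m + 1) 0 = vs[m] := by
        simp [List.getD_eq_getElem?_getD, List.getElem?_eq_getElem hml]
      rw [hvm, List.take_add_one, List.getElem?_eq_getElem hml]
      simp only [Option.toList_some]
      rw [pv_pick_append]
      have hlt : (vs.take m).length = m := by simp [hm']
      rw [hlt]
      by_cases hc : (pvPick (vs.take m) 1 (0, v)).2 < vs[m]
      · rw [if_pos hc, if_pos hc]
        refine ⟨by push_cast; ring, ?_, ?_, ?_⟩
        · have hne : m + 1 ≠ 0 := by omega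
          have hlen : 0 < r.2.length := by
            simp [ih3]
          simp [List.getD_eq_getElem?_getD, hlen]
        · simp [ih3]
        · intro j hj
          have h1 : m + 1 ≠ j := by omega
          have h2 : (0 : Nat) ≠ j := by omega
          simp only [List.getD_eq_getElem?_getD, List.getElem?_set_ne h1, List.getElem?_set_ne h2]
          have := ih4 j (by omega)
          simpa [List.getD_eq_getElem?_getD] using this
      · rw [if_neg hc, if_neg hc]
        exact ⟨ih1, ih2, ih3, fun j hj => ih4 j (by omega)⟩

theorem pv_split_head (cs : List Char) : ∀ (cur : List Char), '0' ∈ cs →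
    ∃ rest, (pvSplit cs cur).1 = (cur ++ cs.takeWhile (fun c => c != '0')) :: rest := by
  induction cs with
  | nil => intro cur h; simp at h
  | cons c cs ih =>
      intro cur h
      by_cases hc : c = '0'
      · exact ⟨(pvSplit cs []).1, by simp [pvSplit, hc, List.takeWhile]⟩
      · have h' : '0' ∈ cs := by
          rcases List.mem_cons.mp h with h0 | h0
          · exact absurd h0.symm hc
          · exact h0
        obtain ⟨rest, hr⟩ := ih (cur ++ [c]) h'
        exact ⟨rest, by simp [pvSplit, hc, hr, bne_iff_ne]⟩

theorem pv_BINV (l : List (List Char)) : ∀ (full : List (List Char)) (k i : Nat) (b : Int),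
    full.drop k = l →
    l.foldl pvBest (some (String.ofList (full.getD i []), b)) =
      some (String.ofList (full.getD (pvPick (l.map pvSum) k (i, b)).1 []),
        (pvPick (l.map pvSum) k (i, b)).2) := by
  induction l with
  | nil => intro full k i b _; simp [pvPick]
  | cons x xs ih =>
      intro full k i b h
      have hk : full.getD k [] = x := by
        have h0 : full[k]? = some x := by
          have h1 : (full.drop k)[0]? = some x := by rw [h]; rfl
          rw [List.getElem?_drop] at h1
          simpa using h1
        simp [List.getD_eq_getElem?_getD, h0]
      have hdrop : full.drop (k + 1) = xs := by
        have : full.drop (k + 1) = (full.drop k).drop 1 := by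
          rw [List.drop_drop]
        rw [this, h]
        simp
      simp only [List.foldl_cons, List.map_cons, pvPick, pvBest, gt_iff_lt]
      by_cases hx : b < pvSum x
      · rw [if_pos hx, if_pos hx]
        have hI := ih full (k + 1) k (pvSum x) hdrop
        rw [hk] at hI
        exact hI
      · rw [if_neg hx, if_neg hx, ih full (k + 1) i b hdrop]

-- ===== VERDICT (by name: the statement is the Claim_ definition above) =====
theorem terminatedSum_spec : Claim_equal_terminatedSum := by
  intro s _ hpre
  unfold Spec_terminatedSum
  obtain ⟨h0, -⟩ := id hpre
  obtain ⟨rest, hsegs⟩ := pv_split_head s.toList [] h0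
  simp only [List.nil_append] at hsegs
  set tw := s.toList.takeWhile (fun c => c != '0') with htw
  set segs := (pvSplit s.toList []).1 with hsg
  set P := pvPick (rest.map pvSum) 1 (0, pvSum tw) with hP
  have hget0 : segs.getD 0 [] = tw := by rw [hsegs]; rfl
  have hdrop : segs.drop 1 = rest := by rw [hsegs]; rfl
  have hB : terminatedSum_alt s =
      ("Largest sum of degit is:", String.ofList (segs.getD P.1 []),
       "and its Sum is:", P.2) := by
    simp only [terminatedSum_alt]
    rw [pv_B1]
    rw [← hsg, hsegs]
    simp only [List.foldl_cons]
    have hstep : pvBest none tw = some (String.ofList (segs.getD 0 []), pvSum tw) := by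
      rw [hget0]; rfl
    rw [hstep, pv_BINV rest segs 1 0 (pvSum tw) hdrop, ← hP]
    simp [hsegs]
  have hA : terminatedSum s =
      ("Largest sum of degit is:", String.ofList (segs.getD P.1 []),
       "and its Sum is:", P.2) := by
    simp only [terminatedSum]
    rw [pv_A1]
    simp only [List.nil_append, ← hsg]
    have hds : segs.foldl (fun ds seg => ds ++ [pvSegSum seg]) [] = segs.map pvSum := by
      rw [PySem.List.foldl_append_singleton_eq_map pvSegSum segs []]
      simp [pv_sum_eq]
    rw [hds]
    have hlen : ((segs.map pvSum).length : Int) - 1 = ((rest.length : Nat) : Int) := by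
      rw [hsegs]; simp
    rw [hlen, PySem.List.pyRange_one]
    have htn : (((rest.length : Nat) : Int) - 0).toNat = rest.length := by simp
    rw [htn, List.foldl_map]
    have hsel := pv_SEL (rest.map pvSum) (pvSum tw) (rest.map pvSum).length (le_refl _)
    rw [List.take_length] at hsel
    have hfold : (List.range rest.length).foldl
        (fun st (k : Nat) => pvStepSel st ((0 : Int) + k)) ((0 : Int), pvSum tw :: rest.map pvSum)
        = (List.range (rest.map pvSum).length).foldl
        (fun st (k : Nat) => pvStepSel st ((0 : Int) + k)) ((0 : Int), pvSum tw :: rest.map pvSum) := by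
      simp
    have hinit : ((0 : Int), (pvSum tw :: rest.map pvSum)) = ((0 : Int), segs.map pvSum) := by
      rw [hsegs]; simp
    obtain ⟨e1, e2, -, -⟩ := hsel
    rw [← hP] at e1 e2
    rw [hinit] at e1 e2 hfold
    rw [hfold, e1, PySem.List.pyGetD_zero, e2]
    simp
  rw [hA, hB]
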